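-- pv_equiv track=rewrite | github.com/Calvin-Liew/OntarioGrade12Math | unit2.py | find_polynomial_factors
-- ===== SOURCE A (Python) =====
-- def find_factors(x: int) -> list[int]:
--     """
--     Return the factors of <x>
--
--     >>> find_factors(2)
--     [1, 2]
--     """
--     factors = set()
--     factors.add(1)
--     factors.add(x)
--     for i in range(2, x//2):
--         if x % i == 0:
--             factors.add(i)
--             factors.add(x//i)
--     factors = list(factors)
--     factors.sort()
--     return factors
--
-- def find_polynomial_factors(a: int, b: int) -> list[str]:
--     """
--     Return the possible factors of a polynomial which has the leading coefficient <a>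
--     and the constant <b>
--
--     Preconditions:
--     - a != 0
--
--     >>> find_polynomial_factors(2, 3)
--     ['1/1', '3/1', '1/2', '3/2']
--     """
--     a_factors = find_factors(a)
--     b_factors = find_factors(b)
--     factors = []
--
--     for i in a_factors:
--         for j in b_factors:
--             factors.append(str(j) + '/' + str(i))
--
--     return factors
-- ===== SOURCE B (Python) =====
-- def find_factors(x: int) -> list[int]:
--     # sqrt-bounded trial division: each small divisor i also yields its cofactor x//i
--     factors = {1, x}
--     i = 2
--     while i * i <= x:
--         if x % i == 0:
--             factors.add(i)
--             factors.add(x // i)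
--         i += 1
--     return sorted(factors)
--
--
-- def find_polynomial_factors(a: int, b: int) -> list[str]:
--     a_factors = find_factors(a)
--     b_factors = find_factors(b)
--     return [f"{j}/{i}" for i in a_factors for j in b_factors]
-- ===== Notes on version B (the rewrite author's own statement) =====
-- stated objective: faster
-- what changed: find_factors now does trial division only up to sqrt(x) (a while loop collecting each divisor with its cofactor) instead of scanning every i in range(2, x//2), and the product list is built by a flat comprehension.
-- intended difference: When a = 4 or b = 4, A omits the factor 2 of 4 (its loop range(2, x//2) is empty at x=4, so e.g. find_polynomial_factors(4,3) lacks '1/2' and '3/2') while B lists all factors of 4; the full factor list is what the function is for. — e.g. on find_polynomial_factors(4, 3): A returns ["1/1", "3/1", "1/4", "3/4"], B returns ["1/1", "3/1", "1/2", "3/2", "1/4", "3/4"]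
import Mathlib
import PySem

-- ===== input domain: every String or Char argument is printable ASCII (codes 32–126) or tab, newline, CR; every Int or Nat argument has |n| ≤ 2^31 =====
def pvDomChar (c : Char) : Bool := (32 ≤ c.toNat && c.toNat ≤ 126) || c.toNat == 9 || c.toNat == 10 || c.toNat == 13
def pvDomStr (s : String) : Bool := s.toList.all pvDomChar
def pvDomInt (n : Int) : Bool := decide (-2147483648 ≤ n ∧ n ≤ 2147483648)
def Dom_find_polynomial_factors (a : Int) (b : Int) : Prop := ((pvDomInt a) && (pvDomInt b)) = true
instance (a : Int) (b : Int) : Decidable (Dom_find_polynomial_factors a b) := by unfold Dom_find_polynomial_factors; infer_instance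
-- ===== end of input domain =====

-- B replaces A's O(x) scan of range(2, x//2) in find_factors by trial division up to sqrt(x)
-- (collecting each divisor with its cofactor): asymptotically faster. On a = 4 or b = 4 the
-- results differ intentionally (see D_ below): A misses the factor 2 of 4.

-- ===== PORT A =====
def find_factors_A (x : Int) : List Int :=
  let factors : PySem.Set Int := (PySem.Set.empty.add 1).add x
  let factors :=
    (PySem.List.pyRange 2 (PySem.Int.floordiv x 2) 1).foldl
      (fun f i =>
        if PySem.Int.mod x i = 0 then (f.add i).add (PySem.Int.floordiv x i) else f)
      factors
  PySem.List.sorted factors (fun v => v) false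

def find_polynomial_factors (a : Int) (b : Int) : List String :=
  let a_factors := find_factors_A a
  let b_factors := find_factors_A b
  a_factors.foldl
    (fun fs i =>
      b_factors.foldl
        (fun fs j => fs ++ [PySem.Int.toStr j ++ "/" ++ PySem.Int.toStr i]) fs)
    []

-- ===== PORT B =====
-- the 'while i * i <= x' loop of Source B's find_factors
def ffB_loop (x : Int) (i : Int) (f : PySem.Set Int) : PySem.Set Int :=
  if i * i ≤ x then
    ffB_loop x (i + 1)
      (if PySem.Int.mod x i = 0 then (f.add i).add (PySem.Int.floordiv x i) else f)
  else f
termination_by (x + 1 - i).toNat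
decreasing_by
  have h3 : 2 * i - 1 ≤ i * i := by nlinarith [mul_self_nonneg (i - 1)]
  have h4 : 0 ≤ i * i := mul_self_nonneg _
  omega

def find_factors_B (x : Int) : List Int :=
  let factors : PySem.Set Int := (PySem.Set.empty.add 1).add x
  PySem.List.sorted (ffB_loop x 2 factors) (fun v => v) false

def find_polynomial_factors_alt (a : Int) (b : Int) : List String :=
  let a_factors := find_factors_B a
  let b_factors := find_factors_B b
  a_factors.flatMap
    (fun i => b_factors.map (fun j => PySem.Int.toStr j ++ "/" ++ PySem.Int.toStr i))

-- ===== PRECONDITION & SPEC =====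
-- When a = 4 or b = 4, A omits the factor 2 of 4 (its range(2, x//2) is empty at x = 4), so
-- e.g. A lacks the '…/2' entries for a = 4; B lists all factors of 4, which is the intended value.
def D_find_polynomial_factors (a : Int) (b : Int) : Prop := a = 4 ∨ b = 4
instance (a : Int) (b : Int) : Decidable (D_find_polynomial_factors a b) := by
  unfold D_find_polynomial_factors; infer_instance

def Spec_find_polynomial_factors (a : Int) (b : Int) (out : List String) : Prop :=
  ¬ D_find_polynomial_factors a b → out = find_polynomial_factors_alt a b
instance (a : Int) (b : Int) (out : List String) : Decidable (Spec_find_polynomial_factors a b out) := by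
  unfold Spec_find_polynomial_factors; infer_instance

def pvDiffWitness_find_polynomial_factors : Int × Int := (4, 3)
def pvDiffWitnessOut_find_polynomial_factors : (List String) × (List String) :=
  (["1/1", "3/1", "1/4", "3/4"], ["1/1", "3/1", "1/2", "3/2", "1/4", "3/4"])

-- ===== CLAIM (what is proved, stated in full; the proofs are below) =====
def Claim_unchanged_find_polynomial_factors : Prop := ∀ (a : Int) (b : Int), Dom_find_polynomial_factors a b → Spec_find_polynomial_factors a b (find_polynomial_factors a b)
def Claim_changed_find_polynomial_factors : Prop := Dom_find_polynomial_factors (pvDiffWitness_find_polynomial_factors.1) (pvDiffWitness_find_polynomial_factors.2) ∧ D_find_polynomial_factors (pvDiffWitness_find_polynomial_factors.1) (pvDiffWitness_find_polynomial_factors.2) ∧ find_polynomial_factors (pvDiffWitness_find_polynomial_factors.1) (pvDiffWitness_find_polynomial_factors.2) = pvDiffWitnessOut_find_polynomial_factors.1 ∧ find_polynomial_factors_alt (pvDiffWitness_find_polynomial_factors.1) (pvDiffWitness_find_polynomial_factors.2) = pvDiffWitnessOut_find_polynomial_factors.2 ∧ pvDiffWitnessOut_find_polynomial_factors.1 ≠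 pvDiffWitnessOut_find_polynomial_factors.2
def Claim_exact_find_polynomial_factors : Prop := ∀ (a : Int) (b : Int), Dom_find_polynomial_factors a b → D_find_polynomial_factors a b → find_polynomial_factors a b ≠ find_polynomial_factors_alt a b

-- ===== LEMMAS AND PROOFS =====

-- membership through A's divisor-collecting foldl
theorem memA_loop (x d : Int) (l : List Int) (f : PySem.Set Int) :
    d ∈ l.foldl
        (fun f i => if PySem.Int.mod x i = 0 then (f.add i).add (PySem.Int.floordiv x i) else f)
        f
      ↔ d ∈ f ∨ ∃ i ∈ l, PySem.Int.mod x i = 0 ∧ (d = i ∨ d = PySem.Int.floordiv x i) := by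
  induction l generalizing f with
  | nil => simp
  | cons hd tl ih =>
    simp only [List.foldl_cons, ih, List.mem_cons]
    by_cases h : PySem.Int.mod x hd = 0 <;>
      · simp only [h, if_true, if_false, PySem.Set.mem_add]
        constructor
        · rintro (hm | hm) <;> aesop
        · rintro (hm | hm) <;> aesop

theorem nodupA_loop (x : Int) (l : List Int) (f : PySem.Set Int) (hf : f.Nodup) :
    (l.foldl
        (fun f i => if PySem.Int.mod x i = 0 then (f.add i).add (PySem.Int.floordiv x i) else f)
        f).Nodup := by
  induction l generalizing f with
  | nil => exact hf
  | cons hd tl ih =>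
    simp only [List.foldl_cons]
    apply ih
    by_cases h : PySem.Int.mod x hd = 0 <;>
      simp [h, PySem.Set.nodup_add, hf]

theorem ffB_loop_stop (x i : Int) (f : PySem.Set Int) (h : ¬ i * i ≤ x) :
    ffB_loop x i f = f := by
  rw [ffB_loop]; simp [h]

theorem ffB_loop_step (x i : Int) (f : PySem.Set Int) (h : i * i ≤ x) :
    ffB_loop x i f =
      ffB_loop x (i + 1)
        (if PySem.Int.mod x i = 0 then (f.add i).add (PySem.Int.floordiv x i) else f) := by
  rw [ffB_loop]; simp [h]

theorem memB_loop (x : Int) (d : Int) (i : Int) (f : PySem.Set Int) (hi : 2 ≤ i) :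
    d ∈ ffB_loop x i f ↔
      d ∈ f ∨ ∃ k, i ≤ k ∧ k * k ≤ x ∧ PySem.Int.mod x k = 0 ∧
        (d = k ∨ d = PySem.Int.floordiv x k) := by
  by_cases h : i * i ≤ x
  · rw [ffB_loop_step x i f h]
    have ih := memB_loop x d (i + 1)
      (if PySem.Int.mod x i = 0 then (f.add i).add (PySem.Int.floordiv x i) else f) (by omega)
    rw [ih]
    constructor
    · rintro (hm | ⟨k, hk1, hk2, hk3, hk4⟩)
      · by_cases hc : PySem.Int.mod x i = 0
        · simp only [hc, if_true, PySem.Set.mem_add] at hm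
          rcases hm with (hm' | rfl) | rfl
          · exact Or.inl hm'
          · exact Or.inr ⟨d, le_refl d, h, hc, Or.inl rfl⟩
          · exact Or.inr ⟨i, le_refl i, h, hc, Or.inr rfl⟩
        · simp only [hc, if_false] at hm
          exact Or.inl hm
      · exact Or.inr ⟨k, by omega, hk2, hk3, hk4⟩
    · rintro (hm | ⟨k, hk1, hk2, hk3, hk4⟩)
      · left
        by_cases hc : PySem.Int.mod x i = 0 <;> simp [hc, PySem.Set.mem_add, hm]
      · by_cases hki : k = i
        · subst hki
          left
          simp only [hk3, if_true, PySem.Set.mem_add]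
          tauto
        · exact Or.inr ⟨k, by omega, hk2, hk3, hk4⟩
  · rw [ffB_loop_stop x i f h]
    constructor
    · exact Or.inl
    · rintro (hm | ⟨k, hk1, hk2, hk3, hk4⟩)
      · exact hm
      · exfalso
        have : i * i ≤ k * k := by nlinarith
        omega
termination_by (x + 1 - i).toNat
decreasing_by
  have h3 : 2 * i - 1 ≤ i * i := by nlinarith [mul_self_nonneg (i - 1)]
  omega

theorem nodupB_loop (x i : Int) (f : PySem.Set Int) (hf : f.Nodup) :
    (ffB_loop x i f).Nodup := by
  by_cases h : i * i ≤ x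
  · rw [ffB_loop_step x i f h]
    apply nodupB_loop
    by_cases hc : PySem.Int.mod x i = 0 <;> simp [hc, PySem.Set.nodup_add, hf]
  · rw [ffB_loop_stop x i f h]; exact hf
termination_by (x + 1 - i).toNat
decreasing_by
  have h3 : 2 * i - 1 ≤ i * i := by nlinarith [mul_self_nonneg (i - 1)]
  have h4 : 0 ≤ i * i := mul_self_nonneg _
  omega

def setA (x : Int) : PySem.Set Int :=
  (PySem.List.pyRange 2 (PySem.Int.floordiv x 2) 1).foldl
    (fun f i => if PySem.Int.mod x i = 0 then (f.add i).add (PySem.Int.floordiv x i) else f)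
    ((PySem.Set.empty.add 1).add x)

def setB (x : Int) : PySem.Set Int := ffB_loop x 2 ((PySem.Set.empty.add 1).add x)

theorem ffA_def (x : Int) : find_factors_A x = PySem.List.sorted (setA x) (fun v => v) false := rfl
theorem ffB_def (x : Int) : find_factors_B x = PySem.List.sorted (setB x) (fun v => v) false := rfl

theorem init_nodup (x : Int) : ((PySem.Set.empty.add 1).add x : PySem.Set Int).Nodup :=
  PySem.Set.nodup_add _ _ (PySem.Set.nodup_add _ _ (by simp [PySem.Set.empty]))

-- the common abstract description of the recorded factors
def GoodF (x d : Int) : Prop := d = 1 ∨ d = x ∨ (2 ≤ d ∧ d ∣ x ∧ 2 * d ≤ x)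

theorem memA_iff (x d : Int) (hx : x ≠ 4) : d ∈ setA x ↔ GoodF x d := by
  unfold setA GoodF
  rw [memA_loop]
  simp only [PySem.Set.mem_add, PySem.List.mem_pyRange_one]
  constructor
  · rintro (((h | rfl) | rfl) | ⟨i, ⟨hi2, hilt⟩, hmod, hd⟩)
    · simp [PySem.Set.empty] at h
    · exact Or.inl rfl
    · exact Or.inr (Or.inl rfl)
    · have h3 : 3 ≤ PySem.Int.floordiv x 2 := by omega
      have h6 : 6 ≤ x := by
        have := (PySem.Int.le_floordiv_iff_mul_le (a := x) (b := 2) (q := 3) (by norm_num)).1 h3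
        omega
      rw [PySem.Int.floordiv_eq_ediv_of_pos (by norm_num : (0:Int) < 2)] at hilt
      rw [PySem.Int.mod_eq_zero_iff_dvd] at hmod
      obtain ⟨c, hc⟩ := hmod
      have hi0 : 0 < i := by omega
      have hfl : PySem.Int.floordiv x i = c := by
        rw [PySem.Int.floordiv_eq_ediv_of_pos hi0, hc, Int.mul_ediv_cancel_left _ (by omega)]
      have h2i : 2 * i + 2 ≤ x := by
        have h1 : (i + 1) * 2 ≤ x := (Int.le_ediv_iff_mul_le (by norm_num)).1 (by omega)
        omega
      have hc0 : 0 < c := by nlinarith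
      rcases hd with rfl | rfl
      · exact Or.inr (Or.inr ⟨hi2, ⟨c, hc⟩, by omega⟩)
      · rw [hfl]
        have hc2 : 2 < c := by nlinarith
        refine Or.inr (Or.inr ⟨by omega, ⟨i, by linarith [hc]⟩, by nlinarith⟩)
  · rintro (rfl | rfl | ⟨hd2, ⟨c, hc⟩, h2d⟩)
    · exact Or.inl (Or.inl (Or.inr rfl))
    · exact Or.inl (Or.inr rfl)
    · have hx5 : 5 ≤ x := by omega
      have hd0 : 0 < d := by omega
      have hc2 : 2 ≤ c := by nlinarith
      have hdle : d ≤ x / 2 := (Int.le_ediv_iff_mul_le (by norm_num)).2 (by omega)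
      right
      by_cases hdlt : d < x / 2
      · refine ⟨d, ⟨hd2, ?_⟩, ?_, Or.inl rfl⟩
        · rw [PySem.Int.floordiv_eq_ediv_of_pos (by norm_num : (0:Int) < 2)]; exact hdlt
        · rw [PySem.Int.mod_eq_zero_iff_dvd]; exact ⟨c, hc⟩
      · -- d = x / 2, so x = 2*d and 2 is the witness
        have hde : d = x / 2 := by omega
        have hlow : 2 * (x / 2) + 1 ≥ x := by omega
        have hcle : c ≤ 2 := by nlinarith
        have hce : c = 2 := by omega
        have hxe : x = 2 * d := by rw [hc, hce]; ring
        have hd3 : 3 ≤ d := by omega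
        refine ⟨2, ⟨le_refl 2, ?_⟩, ?_, Or.inr ?_⟩
        · rw [PySem.Int.floordiv_eq_ediv_of_pos (by norm_num : (0:Int) < 2)]; omega
        · rw [PySem.Int.mod_eq_zero_iff_dvd]; exact ⟨d, hxe⟩
        · rw [PySem.Int.floordiv_eq_ediv_of_pos (by norm_num : (0:Int) < 2), hxe,
            Int.mul_ediv_cancel_left _ (by norm_num)]

theorem memB_iff (x d : Int) : d ∈ setB x ↔ GoodF x d := by
  unfold setB GoodF
  rw [memB_loop x d 2 _ (le_refl 2)]
  simp only [PySem.Set.mem_add]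
  constructor
  · rintro (((h | rfl) | rfl) | ⟨k, hk2, hkk, hmod, hd⟩)
    · simp [PySem.Set.empty] at h
    · exact Or.inl rfl
    · exact Or.inr (Or.inl rfl)
    · rw [PySem.Int.mod_eq_zero_iff_dvd] at hmod
      obtain ⟨c, hc⟩ := hmod
      have hk0 : 0 < k := by omega
      have hfl : PySem.Int.floordiv x k = c := by
        rw [PySem.Int.floordiv_eq_ediv_of_pos hk0, hc, Int.mul_ediv_cancel_left _ (by omega)]
      have hkc : k ≤ c := by nlinarith
      have hc2 : 2 ≤ c := by omega
      rcases hd with rfl | rfl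
      · exact Or.inr (Or.inr ⟨hk2, ⟨c, hc⟩, by nlinarith⟩)
      · rw [hfl]
        exact Or.inr (Or.inr ⟨hc2, ⟨k, by linarith [hc]⟩, by nlinarith⟩)
  · rintro (rfl | rfl | ⟨hd2, ⟨c, hc⟩, h2d⟩)
    · exact Or.inl (Or.inl (Or.inr rfl))
    · exact Or.inl (Or.inr rfl)
    · have hd0 : 0 < d := by omega
      have hc2 : 2 ≤ c := by nlinarith
      right
      by_cases hdc : d ≤ c
      · refine ⟨d, hd2, by nlinarith, ?_, Or.inl rfl⟩
        rw [PySem.Int.mod_eq_zero_iff_dvd]; exact ⟨c, hc⟩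
      · refine ⟨c, hc2, by nlinarith, ?_, Or.inr ?_⟩
        · rw [PySem.Int.mod_eq_zero_iff_dvd]; exact ⟨d, by linarith [hc]⟩
        · rw [PySem.Int.floordiv_eq_ediv_of_pos (by omega : (0:Int) < c),
            (by linarith [hc] : x = c * d), Int.mul_ediv_cancel_left _ (by omega)]

theorem nodup_setA (x : Int) : (setA x).Nodup := nodupA_loop x _ _ (init_nodup x)

theorem nodup_setB (x : Int) : (setB x).Nodup := nodupB_loop x 2 _ (init_nodup x)

theorem ffA_eq_ffB (x : Int) (hx : x ≠ 4) : find_factors_A x = find_factors_B x := by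
  rw [ffA_def, ffB_def]
  apply PySem.List.sorted_eq_sorted_of_perm _ _ _ (fun a b h => h)
  rw [List.perm_ext_iff_of_nodup (nodup_setA x) (nodup_setB x)]
  intro d
  rw [memA_iff x d hx, memB_iff x d]

theorem A_eq_flat (a b : Int) :
    find_polynomial_factors a b =
      (find_factors_A a).flatMap
        (fun i => (find_factors_A b).map
          (fun j => PySem.Int.toStr j ++ "/" ++ PySem.Int.toStr i)) := by
  unfold find_polynomial_factors
  simp only [PySem.List.foldl_append_singleton_eq_map, PySem.List.foldl_append_eq_flatMap,
    List.nil_append]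

theorem len_flatMap_map {α β : Type} (l m : List α) (g : α → α → β) :
    ((l.flatMap (fun i => m.map (g i))).length) = l.length * m.length := by
  induction l with
  | nil => simp
  | cons hd tl ih => simp [ih]; ring

theorem one_mem_setB (x : Int) : (1 : Int) ∈ setB x := by
  unfold setB
  rw [memB_loop x 1 2 _ (le_refl 2)]
  simp [PySem.Set.mem_add]

theorem ffB_len_pos (x : Int) : 0 < (find_factors_B x).length := by
  rw [ffB_def]
  exact List.length_pos_of_mem ((PySem.List.mem_sorted _ _ _ _).2 (one_mem_setB x))

theorem ffA_4 : find_factors_A 4 = [1, 4] := by decide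

theorem ffB_4 : find_factors_B 4 = [1, 2, 4] := by
  rw [show find_factors_B 4 = PySem.List.sorted (ffB_loop 4 2 ((PySem.Set.empty.add 1).add 4)) (fun v => v) false from rfl]
  rw [ffB_loop_step 4 2 _ (by norm_num), ffB_loop_stop 4 (2 + 1) _ (by norm_num)]
  decide

theorem ffB_3 : find_factors_B 3 = [1, 3] := by
  rw [show find_factors_B 3 = PySem.List.sorted (ffB_loop 3 2 ((PySem.Set.empty.add 1).add 3)) (fun v => v) false from rfl]
  rw [ffB_loop_stop 3 2 _ (by norm_num)]
  decide

theorem B_len (a b : Int) :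
    (find_polynomial_factors_alt a b).length =
      (find_factors_B a).length * (find_factors_B b).length := by
  unfold find_polynomial_factors_alt
  exact len_flatMap_map _ _ _

theorem A_len (a b : Int) :
    (find_polynomial_factors a b).length =
      (find_factors_A a).length * (find_factors_A b).length := by
  rw [A_eq_flat]
  exact len_flatMap_map _ _ _

-- ===== VERDICT (by name: the statement is the Claim_ definition above) =====
theorem find_polynomial_factors_spec : Claim_unchanged_find_polynomial_factors := by
  intro a b _ hD
  unfold D_find_polynomial_factors at hD
  rw [not_or] at hD
  rw [A_eq_flat, ffA_eq_ffB a hD.1, ffA_eq_ffB b hD.2]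
  rfl

theorem find_polynomial_factors_changed : Claim_changed_find_polynomial_factors := by
  unfold Claim_changed_find_polynomial_factors
  refine ⟨by decide, Or.inl rfl, by decide, ?_, by decide⟩
  show find_polynomial_factors_alt 4 3 = _
  simp only [find_polynomial_factors_alt, ffB_4, ffB_3]
  decide

theorem find_polynomial_factors_tight : Claim_exact_find_polynomial_factors := by
  intro a b _ hD heq
  have hlen := congrArg List.length heq
  rw [A_len, B_len] at hlen
  rcases hD with rfl | rfl
  · rw [ffA_4, ffB_4] at hlen
    by_cases hb : b = 4
    · subst hb; rw [ffA_4, ffB_4] at hlen; simp at hlen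
    · rw [ffA_eq_ffB b hb] at hlen
      have := ffB_len_pos b
      simp only [List.length_cons, List.length_nil] at hlen
      omega
  · rw [ffA_4, ffB_4] at hlen
    by_cases ha : a = 4
    · subst ha; rw [ffA_4, ffB_4] at hlen; simp at hlen
    · rw [ffA_eq_ffB a ha] at hlen
      have := ffB_len_pos a
      simp only [List.length_cons, List.length_nil] at hlen
      omega
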